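-- pv_equiv track=rewrite | github.com/sakimarquis/Mooc | An Introduction to Interactive Programming in Python/Capstone Exam pick_a_number.py | simu_pick
-- ===== SOURCE A (Python) =====
-- def pick_a_number(board):
--     """
--     optimal play means that the player maximizes his final score
--     """
--     if len(board) == 0:
--         return (0, None)
--     else:
--         # optimize the (first take + second take)
--
--         first_first = board[0] + pick_a_number(board[2:])[0]
--         first_last = board[0] + pick_a_number(board[1:-1])[0]
--         first_smaller = min(first_first, first_last)
--
--         last_first = board[-1] + pick_a_number(board[1:-1])[0]
--         last_last = board[-1] + pick_a_number(board[0:-2])[0]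
--         last_smaller = min(last_first, last_last)
--
--         if first_smaller > last_smaller:
--             return (board[0],0)
--         else:
--             return (board[-1],-1)
--
-- def simu_pick(board):
--     """
--     simulate the pick a number alg
--     """
--     player1 = []
--     player2 = []
--     flag = 1
--     while len(board) > 0:
--         idx = pick_a_number(board)[1]
--         if flag == 1:
--             player1.append(board.pop(idx))
--             flag = 2
--         elif flag == 2:
--             player2.append(board.pop(idx))
--             flag = 1
--     return (player1, player2)
-- ===== SOURCE B (Python) =====
-- def simu_pick(board):
--     """
--     simulate the pick a number alg
--     (interval DP: O(n^2) instead of re-running the exponential recursion;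
--     does not mutate the input board -- equivalence is about the return value)
--     """
--     n = len(board)
--     # pm2 / pm1: rows of pick-values for intervals of lengths L-2 and L-1
--     pm1 = [0] * (n + 2)
--     pm2 = [0] * (n + 2)
--     choices = [[]]  # choices[L][l] = 0 (take front) / -1 (take back) for board[l:l+L]
--     for L in range(1, n + 1):
--         vrow = []
--         crow = []
--         for l in range(n - L + 1):
--             fs = board[l] + min(pm2[l + 2], pm2[l + 1])
--             ls = board[l + L - 1] + min(pm2[l + 1], pm2[l])
--             if fs > ls:
--                 vrow.append(board[l])
--                 crow.append(0)
--             else: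
--                 vrow.append(board[l + L - 1])
--                 crow.append(-1)
--         pm1, pm2 = vrow, pm1
--         choices.append(crow)
--     player1 = []
--     player2 = []
--     l, r = 0, n - 1
--     turn = True
--     while l <= r:
--         if choices[r - l + 1][l] == 0:
--             x = board[l]
--             l += 1
--         else:
--             x = board[r]
--             r -= 1
--         if turn:
--             player1.append(x)
--         else:
--             player2.append(x)
--         turn = not turn
--     return (player1, player2)
-- ===== Notes on version B (the rewrite author's own statement) =====
-- stated objective: faster
-- what changed: B replaces A's exponential re-evaluation of the recursive pick_a_number at every step with a bottom-up O(n^2) interval dynamic program over (position, length) rows plus a two-pointer simulation over the untouched input list (A pops the caller's list empty; B does not mutate it).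
import Mathlib
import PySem

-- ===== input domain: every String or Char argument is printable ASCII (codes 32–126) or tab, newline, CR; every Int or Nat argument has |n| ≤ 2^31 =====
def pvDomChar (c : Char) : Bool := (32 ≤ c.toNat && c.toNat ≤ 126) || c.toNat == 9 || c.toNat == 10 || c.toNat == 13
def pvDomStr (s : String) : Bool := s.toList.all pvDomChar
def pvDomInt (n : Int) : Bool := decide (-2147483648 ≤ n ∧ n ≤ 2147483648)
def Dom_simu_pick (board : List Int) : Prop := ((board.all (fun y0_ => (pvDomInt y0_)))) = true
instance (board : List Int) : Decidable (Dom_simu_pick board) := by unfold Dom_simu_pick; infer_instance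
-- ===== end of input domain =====

-- B replaces A's exponential re-evaluation of pick_a_number with an O(n^2) interval DP over
-- (left,right) index rows; equivalence is about the return value only (Python A pops the caller's
-- list empty, B leaves it untouched).

-- ===== PORT A =====
-- helper pick_a_number, transliterated; board[2:], board[1:-1], board[0:-2] via PySem slices
def pick_a_number (board : List Int) : Int × Option Int :=
  if h : board.length = 0 then (0, none)
  else
    let first_first := PySem.List.pyGetD board 0 0 + (pick_a_number (PySem.List.slice board (some 2) none)).1
    let first_last := PySem.List.pyGetD board 0 0 + (pick_a_number (PySem.List.slice board (some 1) (some (-1)))).1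
    let first_smaller := min first_first first_last
    let last_first := PySem.List.pyGetD board (-1) 0 + (pick_a_number (PySem.List.slice board (some 1) (some (-1)))).1
    let last_last := PySem.List.pyGetD board (-1) 0 + (pick_a_number (PySem.List.slice board (some 0) (some (-2)))).1
    let last_smaller := min last_first last_last
    if first_smaller > last_smaller then (PySem.List.pyGetD board 0 0, some 0)
    else (PySem.List.pyGetD board (-1) 0, some (-1))
termination_by board.length
decreasing_by
  all_goals first
  | (rw [PySem.List.slice_from board (by norm_num : (0:Int) ≤ 2)]; simp; omega)
  | (simp [PySem.List.length_slice, PySem.List.clampIdx]; (try split_ifs) <;> omega)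
  | (rw [PySem.List.slice_zero_start, PySem.List.slice_to_neg_ofNat board 2 (by norm_num)]; simp; omega)

-- A's while loop; flag alternates 1/2; board.pop(idx) via PySem.List.pop?.
-- fuel only bounds the recursion: each pop removes one element, so fuel = board.length
-- makes the loop run exactly as Python's `while len(board) > 0` does.
def simuLoopA (fuel : Nat) (board player1 player2 : List Int) (flag : Int) : List Int × List Int :=
  match fuel with
  | 0 => (player1, player2)
  | fuel + 1 =>
    if board.length > 0 then
      -- the pick index is always `some 0` or `some (-1)` here, so pop? never fails
      match PySem.List.pop? board (((pick_a_number board).2).getD 0) with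
      | none => (player1, player2)  -- unreachable
      | some (x, rest) =>
        if flag = 1 then simuLoopA fuel rest (player1 ++ [x]) player2 2
        else if flag = 2 then simuLoopA fuel rest player1 (player2 ++ [x]) 1
        else (player1, player2)  -- unreachable: flag is only ever 1 or 2
    else (player1, player2)

def simu_pick (board : List Int) : List Int × List Int :=
  simuLoopA board.length board [] [] 1

-- ===== PORT B =====
-- body of Source B's inner loop: (choice, value) for the interval board[l:l+L],
-- given pm2 = the value row for intervals of length L-2 (all indices in range)
def rowStep (board pm2 : List Int) (L l : Nat) : Int × Int :=
  let fs := board.getD l 0 + min (pm2.getD (l + 2) 0) (pm2.getD (l + 1) 0)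
  let ls := board.getD (l + L - 1) 0 + min (pm2.getD (l + 1) 0) (pm2.getD l 0)
  if fs > ls then (0, board.getD l 0) else (-1, board.getD (l + L - 1) 0)

-- Source B's outer `for L in range(1, n+1)` loop: returns ((pm1, pm2), choices) after lengths 1..L
def buildRows (board : List Int) : Nat → (List Int × List Int) × List (List Int)
  | 0 => ((List.replicate (board.length + 2) 0, List.replicate (board.length + 2) 0), [[]])
  | L + 1 =>
    let s := buildRows board L
    let row := (List.range (board.length - (L + 1) + 1)).map (fun l => rowStep board s.1.2 (L + 1) l)
    ((row.map Prod.snd, s.1.1), s.2 ++ [row.map Prod.fst])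

-- Source B's final `while l <= r` loop
def simuLoopB (board : List Int) (choices : List (List Int)) (l r : Int)
    (player1 player2 : List Int) (turn : Bool) : List Int × List Int :=
  if h : l ≤ r then
    if PySem.List.pyGetD (PySem.List.pyGetD choices (r - l + 1) []) l 0 = 0 then
      let x := PySem.List.pyGetD board l 0
      if turn then simuLoopB board choices (l + 1) r (player1 ++ [x]) player2 false
      else simuLoopB board choices (l + 1) r player1 (player2 ++ [x]) true
    else
      let x := PySem.List.pyGetD board r 0
      if turn then simuLoopB board choices l (r - 1) (player1 ++ [x]) player2 false
      else simuLoopB board choices l (r - 1) player1 (player2 ++ [x]) true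
  else (player1, player2)
termination_by (r + 1 - l).toNat
decreasing_by all_goals (simp_all <;> omega)

def simu_pick_alt (board : List Int) : List Int × List Int :=
  simuLoopB board (buildRows board board.length).2 0 ((board.length : Int) - 1) [] [] true

-- ===== PRECONDITION & SPEC =====
def Spec_simu_pick (board : List Int) (out : List Int × List Int) : Prop := out = simu_pick_alt board
instance (board : List Int) (out : List Int × List Int) : Decidable (Spec_simu_pick board out) := by unfold Spec_simu_pick; infer_instance

-- ===== CLAIM (what is proved, stated in full; the proofs are below) =====
def Claim_equal_simu_pick : Prop := ∀ (board : List Int), Dom_simu_pick board → Spec_simu_pick board (simu_pick board)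

-- ===== LEMMAS AND PROOFS =====

-- the contiguous interval board[l : l+L]
def pvSub (board : List Int) (l L : Nat) : List Int := (board.drop l).take L

-- the row of pick-values for all intervals of length j (row "0" = the initial all-zero rows)
def rowSpec (board : List Int) (j : Nat) : List Int :=
  if j = 0 then List.replicate (board.length + 2) 0
  else (List.range (board.length - j + 1)).map (fun l => (pick_a_number (pvSub board l j)).1)

-- the row of choices (0 / -1) for all intervals of length j
def chRow (board : List Int) (j : Nat) : List Int :=
  (List.range (board.length - j + 1)).map (fun l => ((pick_a_number (pvSub board l j)).2).getD 0)

theorem pvSub_length (board : List Int) (l L : Nat) (h : l + L ≤ board.length) :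
    (pvSub board l L).length = L := by
  simp [pvSub]; omega

theorem pvSub_drop (board : List Int) (l L k : Nat) :
    (pvSub board l L).drop k = pvSub board (l + k) (L - k) := by
  simp [pvSub, List.drop_take, List.drop_drop]

theorem pvSub_take (board : List Int) (l L k : Nat) (h : k ≤ L) :
    (pvSub board l L).take k = pvSub board l k := by
  simp [pvSub, List.take_take]; omega

theorem pvSub_cons (board : List Int) (l m : Nat) (h : l < board.length) :
    pvSub board l (m + 1) = board.getD l 0 :: pvSub board (l + 1) m := by
  show (board.drop l).take (m + 1) = _
  rw [List.drop_eq_getElem_cons h, List.take_succ_cons, List.getD_eq_getElem?_getD, List.getElem?_eq_getElem h]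
  rfl

theorem pvSub_snoc (board : List Int) (l m : Nat) (h : l + (m + 1) ≤ board.length) :
    pvSub board l (m + 1) = pvSub board l m ++ [board.getD (l + m) 0] := by
  have hm : m < (board.drop l).length := by simp; omega
  simp [pvSub, List.take_succ, List.getElem?_eq_getElem hm, List.getElem_drop,
        List.getD_eq_getElem?_getD, List.getElem?_eq_getElem (show l + m < board.length by omega)]

theorem slice_two (s : List Int) : PySem.List.slice s (some 2) none = s.drop 2 := by
  rw [PySem.List.slice_from s (by norm_num : (0:Int) ≤ 2)]; rfl

theorem slice_mid (s : List Int) : PySem.List.slice s (some 1) (some (-1)) = (s.drop 1).take (s.length - 2) := by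
  rcases s with _ | ⟨x, t⟩
  · simp [PySem.List.slice]
  · simp [PySem.List.slice, PySem.List.clampIdx]
    congr 1
    split_ifs <;> omega

theorem slice_front (s : List Int) : PySem.List.slice s (some 0) (some (-2)) = s.take (s.length - 2) := by
  rw [PySem.List.slice_zero_start, PySem.List.slice_to_neg_ofNat s 2 (by norm_num)]

theorem sub_head (board : List Int) (l L : Nat) (hL : 1 ≤ L) (h : l + L ≤ board.length) :
    PySem.List.pyGetD (pvSub board l L) 0 0 = board.getD l 0 := by
  obtain ⟨m, rfl⟩ : ∃ m, L = m + 1 := ⟨L - 1, by omega⟩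
  rw [pvSub_cons board l m (by omega)]
  simp [PySem.List.pyGetD_zero_cons]

theorem sub_last (board : List Int) (l L : Nat) (hL : 1 ≤ L) (h : l + L ≤ board.length) :
    PySem.List.pyGetD (pvSub board l L) (-1) 0 = board.getD (l + L - 1) 0 := by
  obtain ⟨m, rfl⟩ : ∃ m, L = m + 1 := ⟨L - 1, by omega⟩
  rw [pvSub_snoc board l m (by omega)]
  simp [PySem.List.pyGetD_neg_one_append_singleton]

theorem rowSpec_getD (board : List Int) (j i : Nat) (h : j = 0 ∨ i + j ≤ board.length) :
    (rowSpec board j).getD i 0 = (pick_a_number (pvSub board i j)).1 := by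
  by_cases h0 : j = 0
  · subst h0
    rw [show pvSub board i 0 = [] from by simp [pvSub]]
    rw [show pick_a_number [] = (0, none) from by rw [pick_a_number]; rfl]
    simp [rowSpec, List.getD_eq_getElem?_getD, List.getElem?_replicate]
    split_ifs <;> rfl
  · have hle : i + j ≤ board.length := h.resolve_left h0
    rw [rowSpec, if_neg h0, PySem.List.getD_map_range _ _ _ _ (by omega)]

theorem pick_eq_rowStep (board : List Int) (L l : Nat) (hL : 1 ≤ L) (h : l + L ≤ board.length) :
    pick_a_number (pvSub board l L)
      = ((rowStep board (rowSpec board (L - 2)) L l).2, some ((rowStep board (rowSpec board (L - 2)) L l).1)) := by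
  have hlen : (pvSub board l L).length = L := pvSub_length board l L h
  rw [pick_a_number]
  rw [dif_neg (by omega : ¬ (pvSub board l L).length = 0)]
  rw [slice_two, slice_mid, slice_front, hlen]
  rw [pvSub_drop board l L 2]
  rw [show (pvSub board l L).drop 1 = pvSub board (l + 1) (L - 1) from pvSub_drop board l L 1]
  rw [pvSub_take board (l + 1) (L - 1) (L - 2) (by omega)]
  rw [pvSub_take board l L (L - 2) (by omega)]
  rw [sub_head board l L hL h, sub_last board l L hL h]
  rw [← rowSpec_getD board (L - 2) (l + 2) (by omega)]
  rw [← rowSpec_getD board (L - 2) (l + 1) (by omega)]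
  rw [← rowSpec_getD board (L - 2) l (by omega)]
  have hmin : ∀ a x y : Int, min (a + x) (a + y) = a + min x y := fun a x y => by omega
  simp only [rowStep, gt_iff_lt]
  rw [hmin, hmin]
  split_ifs <;> rfl

theorem buildRows_inv (board : List Int) (L : Nat) (hL : L ≤ board.length) :
    buildRows board L = ((rowSpec board L, rowSpec board (L - 1)),
      [] :: (List.range L).map (fun j => chRow board (j + 1))) := by
  induction L with
  | zero => simp [buildRows, rowSpec]
  | succ L ih =>
    rw [buildRows, ih (by omega)]
    have hv : ((List.range (board.length - (L + 1) + 1)).map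
          (fun l => rowStep board (rowSpec board (L + 1 - 2)) (L + 1) l)).map Prod.snd
        = rowSpec board (L + 1) := by
      rw [show rowSpec board (L + 1) = (List.range (board.length - (L + 1) + 1)).map
            (fun l => (pick_a_number (pvSub board l (L + 1))).1) from by
          rw [rowSpec, if_neg (by omega : ¬ L + 1 = 0)]]
      rw [List.map_map]
      apply List.map_congr_left
      intro a ha
      simp only [List.mem_range] at ha
      rw [pick_eq_rowStep board (L + 1) a (by omega) (by omega)]
      rfl
    have hc : ((List.range (board.length - (L + 1) + 1)).map
          (fun l => rowStep board (rowSpec board (L + 1 - 2)) (L + 1) l)).map Prod.fst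
        = chRow board (L + 1) := by
      rw [chRow, List.map_map]
      apply List.map_congr_left
      intro a ha
      simp only [List.mem_range] at ha
      rw [pick_eq_rowStep board (L + 1) a (by omega) (by omega)]
      rfl
    refine Prod.ext (Prod.ext ?_ rfl) ?_
    · exact hv
    · show ([] :: (List.range L).map (fun j => chRow board (j + 1))) ++
          [((List.range (board.length - (L + 1) + 1)).map
              (fun l => rowStep board (rowSpec board (L + 1 - 2)) (L + 1) l)).map Prod.fst]
        = [] :: (List.range (L + 1)).map (fun j => chRow board (j + 1))
      rw [hc, List.range_succ, List.map_append]
      rfl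

theorem choices_getD (board : List Int) (m : Nat) (h1 : 1 ≤ m) (h2 : m ≤ board.length) :
    ((buildRows board board.length).2).getD m [] = chRow board m := by
  rw [buildRows_inv board board.length le_rfl]
  obtain ⟨k, rfl⟩ : ∃ k, m = k + 1 := ⟨m - 1, by omega⟩
  rw [List.getD_cons_succ, PySem.List.getD_map_range _ _ _ _ (by omega)]

theorem loop_eq (board : List Int) (m : Nat) : ∀ (l : Nat) (p1 p2 : List Int) (turn : Bool),
    l + m ≤ board.length →
    simuLoopA m (pvSub board l m) p1 p2 (if turn then 1 else 2)
      = simuLoopB board (buildRows board board.length).2 (l : Int) ((l : Int) + m - 1) p1 p2 turn := by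
  induction m with
  | zero =>
    intro l p1 p2 turn h
    rw [simuLoopB]
    rw [dif_neg (by omega : ¬ (l : Int) ≤ (l : Int) + (0 : Nat) - 1)]
    rfl
  | succ m ih =>
    intro l p1 p2 turn h
    have hlen : (pvSub board l (m + 1)).length = m + 1 := pvSub_length _ _ _ h
    have hpick := pick_eq_rowStep board (m + 1) l (by omega) h
    set c := (rowStep board (rowSpec board (m + 1 - 2)) (m + 1) l).1 with hc
    have hch : PySem.List.pyGetD (PySem.List.pyGetD (buildRows board board.length).2
        (((l : Int) + (m + 1 : Nat) - 1) - l + 1) []) (l : Int) 0 = c := by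
      have h1 : ((l : Int) + (m + 1 : Nat) - 1) - l + 1 = ((m + 1 : Nat) : Int) := by push_cast; ring
      rw [h1, PySem.List.pyGetD_natCast (buildRows board board.length).2 (m + 1) [],
          choices_getD board (m + 1) (by omega) (by omega),
          PySem.List.pyGetD_natCast, chRow, PySem.List.getD_map_range _ _ _ _ (by omega), hpick]
      rfl
    have hcases : c = 0 ∨ c = -1 := by
      rw [hc]; unfold rowStep; dsimp only; split_ifs <;> simp
    rw [simuLoopB, dif_pos (by omega : (l : Int) ≤ (l : Int) + (m + 1 : Nat) - 1)]
    rw [hch]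
    rcases hcases with h0 | h1
    · -- take the front element
      have hp : PySem.List.pop? (pvSub board l (m + 1))
          (((pick_a_number (pvSub board l (m + 1))).2).getD 0)
          = some (board.getD l 0, pvSub board (l + 1) m) := by
        rw [hpick]
        simp only [Option.getD_some, h0]
        conv_lhs => rw [pvSub_cons board l m (by omega)]
        exact PySem.List.pop?_zero_cons _ _
      rw [show simuLoopA (m + 1) (pvSub board l (m + 1)) p1 p2 (if turn = true then 1 else 2)
            = _ from rfl]
      simp only [simuLoopA]
      rw [if_pos (by omega : (pvSub board l (m + 1)).length > 0)]
      simp only [hp]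
      rw [if_pos h0]
      have hx : PySem.List.pyGetD board (l : Int) 0 = board.getD l 0 := PySem.List.pyGetD_natCast board l 0
      have hr : (l : Int) + 1 = ((l + 1 : Nat) : Int) := by push_cast; ring
      have hr2 : (l : Int) + (m + 1 : Nat) - 1 = ((l + 1 : Nat) : Int) + (m : Nat) - 1 := by push_cast; ring
      cases turn
      · simp only [Bool.false_eq_true, if_false, reduceIte]
        rw [hx, hr, hr2]
        have := ih (l + 1) p1 (p2 ++ [board.getD l 0]) true (by omega)
        simpa using this
      · simp only [if_true, reduceIte]
        rw [hx, hr, hr2]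
        have := ih (l + 1) (p1 ++ [board.getD l 0]) p2 false (by omega)
        simpa using this
    · -- take the back element
      have hp : PySem.List.pop? (pvSub board l (m + 1))
          (((pick_a_number (pvSub board l (m + 1))).2).getD 0)
          = some (board.getD (l + m) 0, pvSub board l m) := by
        rw [hpick]
        simp only [Option.getD_some, h1]
        conv_lhs => rw [pvSub_snoc board l m (by omega)]
        exact PySem.List.pop?_last _ _
      rw [show simuLoopA (m + 1) (pvSub board l (m + 1)) p1 p2 (if turn = true then 1 else 2)
            = _ from rfl]
      simp only [simuLoopA]
      rw [if_pos (by omega : (pvSub board l (m + 1)).length > 0)]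
      simp only [hp]
      rw [if_neg (show ¬ c = 0 by rw [h1]; norm_num)]
      have hx : PySem.List.pyGetD board ((l : Int) + (m + 1 : Nat) - 1) 0 = board.getD (l + m) 0 := by
        rw [show (l : Int) + (m + 1 : Nat) - 1 = ((l + m : Nat) : Int) from by push_cast; ring,
            PySem.List.pyGetD_natCast]
      have hr : (l : Int) + (m + 1 : Nat) - 1 - 1 = (l : Int) + (m : Nat) - 1 := by push_cast; ring
      cases turn
      · simp only [Bool.false_eq_true, if_false, reduceIte]
        rw [hx, hr]
        have := ih l p1 (p2 ++ [board.getD (l + m) 0]) true (by omega)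
        simpa using this
      · simp only [if_true, reduceIte]
        rw [hx, hr]
        have := ih l (p1 ++ [board.getD (l + m) 0]) p2 false (by omega)
        simpa using this

-- ===== VERDICT (by name: the statement is the Claim_ definition above) =====
theorem simu_pick_spec : Claim_equal_simu_pick := by
  intro board _
  unfold Spec_simu_pick simu_pick simu_pick_alt
  have h := loop_eq board board.length 0 [] [] true (by omega)
  simp only [Nat.cast_zero, zero_add] at h
  rw [show pvSub board 0 board.length = board by simp [pvSub]] at h
  exact h
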